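-- pv_equiv track=rewrite | github.com/TheGodZeno/Python_Cyber_YD | Cyber/Breaking Substitution Encryption/Testing_For_Algorithm.py | createWordPattern_v2
-- ===== SOURCE A (Python) =====
-- def createWordPattern_v2(word):
--     word = word.upper()  # Convert the word to uppercase for consistency
--     nextNum = 0
--     letterNums = {}
--     wordPattern = []
--
--     for letter in word:
--         if letter not in letterNums:
--             letterNums[letter] = str(nextNum)
--             nextNum += 1
--         wordPattern.append(letterNums[letter])
--
--     return '.'.join(wordPattern)
-- ===== SOURCE B (Python) =====
-- def createWordPattern_v2(word):
--     chars = list(word.upper())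
--     return '.'.join(str(len(set(chars[:chars.index(c)]))) for c in chars)
-- ===== Notes on version B (the rewrite author's own statement) =====
-- stated objective: alternative
-- what changed: Drops A's incrementally built letter->number table entirely: each letter's code is computed independently as the number of distinct letters strictly before its first occurrence (len(set(chars[:chars.index(c)]))), so no numbering state is threaded through the traversal.
import Mathlib
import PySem

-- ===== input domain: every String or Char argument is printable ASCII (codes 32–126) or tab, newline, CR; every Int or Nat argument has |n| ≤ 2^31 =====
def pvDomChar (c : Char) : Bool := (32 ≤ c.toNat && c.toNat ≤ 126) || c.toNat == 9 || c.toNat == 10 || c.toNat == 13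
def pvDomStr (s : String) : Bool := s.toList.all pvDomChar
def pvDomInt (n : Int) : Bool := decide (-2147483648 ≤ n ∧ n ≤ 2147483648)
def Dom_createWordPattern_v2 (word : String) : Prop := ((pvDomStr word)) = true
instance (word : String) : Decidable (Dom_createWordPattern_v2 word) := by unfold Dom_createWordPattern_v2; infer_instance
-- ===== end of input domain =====

-- B replaces A's stateful numbering loop (counter + dict threaded through the word) with a
-- stateless per-letter formula: the code of a letter is the number of distinct letters before
-- its first occurrence. Alternative decomposition, not faster.

-- ===== PORT A =====
-- one loop iteration of A; state is (nextNum, letterNums, wordPattern).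
-- letterNums[letter] is read with getD "" — the key is always present at that point (no KeyError).
def createWordPattern_v2_step (st : Int × PySem.Dict Char String × List String) (letter : Char) :
    Int × PySem.Dict Char String × List String :=
  let nextNum := st.1
  let letterNums := st.2.1
  let wordPattern := st.2.2
  let p :=
    if letterNums.contains letter then (nextNum, letterNums)
    else (nextNum + 1, letterNums.insert letter (PySem.Int.toStr nextNum))
  (p.1, p.2, wordPattern ++ [p.2.getD letter ""])

def createWordPattern_v2 (word : String) : String :=
  let w := (PySem.Str.upper word).toList
  let st := w.foldl createWordPattern_v2_step (0, PySem.Dict.empty, [])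
  PySem.Str.join "." st.2.2

-- ===== PORT B =====
-- chars.index(c) never raises here (c is drawn from chars), so index? is always some; getD 0 is
-- exact on every reached input.
def createWordPattern_v2_alt (word : String) : String :=
  let chars := (PySem.Str.upper word).toList
  PySem.Str.join "."
    (chars.map (fun c =>
      PySem.Int.toStr
        (PySem.Set.len (PySem.Set.ofList
            (PySem.List.slice chars none
              (some (((PySem.List.index? chars c).getD 0 : Nat) : Int)))))))

-- ===== PRECONDITION & SPEC =====
def Spec_createWordPattern_v2 (word : String) (out : String) : Prop := out = createWordPattern_v2_alt word
instance (word : String) (out : String) : Decidable (Spec_createWordPattern_v2 word out) := by unfold Spec_createWordPattern_v2; infer_instance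

-- ===== CLAIM (what is proved, stated in full; the proofs are below) =====
def Claim_equal_createWordPattern_v2 : Prop := ∀ (word : String), Dom_createWordPattern_v2 word → Spec_createWordPattern_v2 word (createWordPattern_v2 word)

-- ===== LEMMAS AND PROOFS =====
def pvDictOf (o : List Char) (i : Int) : PySem.Dict Char String :=
  PySem.Dict.mk ((PySem.List.enumerate o i).map (fun p => (p.2, PySem.Int.toStr p.1)))

lemma pvDictOf_get? (o : List Char) (i : Int) (c : Char) :
    (pvDictOf o i).get? c = (PySem.List.index? o c).map (fun k => PySem.Int.toStr (i + k)) := by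
  induction o generalizing i with
  | nil =>
      rw [(PySem.List.index?_eq_none_iff _ _).mpr (by simp)]
      simp [pvDictOf, PySem.List.enumerate_nil, PySem.Dict.get?]
  | cons x xs ih =>
      rw [pvDictOf, PySem.List.enumerate_cons]
      by_cases hx : x = c
      · subst hx
        rw [PySem.List.index?_cons_self]
        simp [PySem.Dict.get?_mk_cons]
      · rw [PySem.List.index?_cons_of_ne _ hx]
        simp only [List.map_cons, PySem.Dict.get?_mk_cons, beq_iff_eq, if_neg hx]
        rw [show PySem.Dict.mk ((PySem.List.enumerate xs (i+1)).map
              (fun p => (p.2, PySem.Int.toStr p.1))) = pvDictOf xs (i+1) from rfl, ih]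
        cases h : PySem.List.index? xs c with
        | none => simp
        | some k => simp; congr 1; ring

lemma pvDictOf_contains (o : List Char) (i : Int) (c : Char) :
    (pvDictOf o i).contains c = decide (c ∈ o) := by
  rw [PySem.Dict.contains_eq_isSome_get?, pvDictOf_get?]
  cases h : PySem.List.index? o c with
  | none => simp [(PySem.List.index?_eq_none_iff _ _).mp h]
  | some k =>
      have : c ∈ o := (PySem.List.index?_isSome_iff _ _).mp (by rw [h]; rfl)
      simp [this]

lemma pvDictOf_append (o : List Char) (i : Int) (c : Char) (hc : c ∉ o) :
    pvDictOf (o ++ [c]) i = (pvDictOf o i).insert c (PySem.Int.toStr (i + o.length)) := by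
  apply PySem.Dict.ext
  rw [PySem.Dict.items_insert_of_not_contains _ _ (by simp [pvDictOf_contains, hc])]
  simp [pvDictOf, PySem.List.enumerate_append, PySem.List.enumerate_cons,
    PySem.List.enumerate_nil]

def pvPat (o : List Char) : List Char → List String
  | [] => []
  | c :: cs =>
      let o' := PySem.Set.add o c
      PySem.Int.toStr (((PySem.List.index? o' c).getD 0 : Nat) : Int) :: pvPat o' cs

lemma pvFold_spec (rest o : List Char) (acc : List String) :
    rest.foldl createWordPattern_v2_step ((o.length : Int), pvDictOf o 0, acc) =
      (((rest.foldl PySem.Set.add o).length : Int), pvDictOf (rest.foldl PySem.Set.add o) 0,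
        acc ++ pvPat o rest) := by
  induction rest generalizing o acc with
  | nil => simp [pvPat]
  | cons c cs ih =>
      rw [List.foldl_cons, List.foldl_cons]
      by_cases hc : c ∈ o
      · have hadd : PySem.Set.add o c = o := PySem.Set.add_of_mem hc
        have hstep : createWordPattern_v2_step ((o.length : Int), pvDictOf o 0, acc) c =
            ((o.length : Int), pvDictOf o 0,
              acc ++ [PySem.Int.toStr (((PySem.List.index? o c).getD 0 : Nat) : Int)]) := by
          obtain ⟨k, hk⟩ := Option.isSome_iff_exists.mp ((PySem.List.index?_isSome_iff _ _).mpr hc)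
          simp only [createWordPattern_v2_step, pvDictOf_contains, hc, decide_true, if_true,
            PySem.Dict.getD_eq_get?_getD, pvDictOf_get?, hk]
          simp
        rw [hstep, ih, pvPat, hadd]
        simp
      · have hadd : PySem.Set.add o c = o ++ [c] := PySem.Set.add_of_not_mem hc
        have hstep : createWordPattern_v2_step ((o.length : Int), pvDictOf o 0, acc) c =
            (((o ++ [c]).length : Int), pvDictOf (o ++ [c]) 0,
              acc ++ [PySem.Int.toStr (((PySem.List.index? (o ++ [c]) c).getD 0 : Nat) : Int)]) := by
          have hins : (pvDictOf o 0).insert c (PySem.Int.toStr (o.length : Int)) =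
              pvDictOf (o ++ [c]) 0 := by
            rw [pvDictOf_append o 0 c hc]; norm_num
          simp only [createWordPattern_v2_step, pvDictOf_contains, hc, decide_false,
            Bool.false_eq_true, if_false, hins, PySem.Dict.getD_eq_get?_getD, pvDictOf_get?,
            PySem.List.index?_append_singleton_self o c hc]
          simp
        rw [hstep, ih, pvPat, hadd]
        simp

lemma pvFoldAdd_ext (cs : List Char) (s : List Char) :
    ∃ t, cs.foldl PySem.Set.add s = s ++ t := by
  induction cs generalizing s with
  | nil => exact ⟨[], by simp⟩
  | cons c cs ih =>
      rw [List.foldl_cons]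
      by_cases hc : c ∈ s
      · rw [PySem.Set.add_of_mem hc]; exact ih s
      · rw [PySem.Set.add_of_not_mem hc]
        obtain ⟨t, ht⟩ := ih (s ++ [c])
        exact ⟨[c] ++ t, by simp [ht]⟩

lemma pvPat_eq (rest o : List Char) :
    pvPat o rest = rest.map (fun c =>
      PySem.Int.toStr (((PySem.List.index? (rest.foldl PySem.Set.add o) c).getD 0 : Nat) : Int)) := by
  induction rest generalizing o with
  | nil => simp [pvPat]
  | cons c cs ih =>
      rw [pvPat, List.map_cons, List.foldl_cons, ih (PySem.Set.add o c)]
      have hmem : c ∈ PySem.Set.add o c := by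
        rw [PySem.Set.mem_add]; right; rfl
      obtain ⟨t, ht⟩ := pvFoldAdd_ext cs (PySem.Set.add o c)
      rw [ht, PySem.List.index?_append_of_mem t hmem]

-- the number A assigns to c (its index in the ordered dedup of w) equals the number B computes
-- (the count of distinct letters strictly before c's first occurrence in w)
lemma pv_index_dedup_eq_card_prefix (w : List Char) (c : Char) (hc : c ∈ w) :
    (PySem.List.index? (PySem.Set.ofList w) c).getD 0 =
      (PySem.Set.ofList (w.take ((PySem.List.index? w c).getD 0))).length := by
  obtain ⟨k, hk⟩ := Option.isSome_iff_exists.mp ((PySem.List.index?_isSome_iff _ _).mpr hc)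
  obtain ⟨pre, suf, hw, hlen, hpre⟩ := (PySem.List.index?_eq_some_iff _ _ _).mp hk
  have htake : w.take ((PySem.List.index? w c).getD 0) = pre := by
    rw [hk, Option.getD_some, ← hlen, hw, List.take_left]
  have hnotmem : c ∉ PySem.Set.ofList pre := by
    rw [PySem.Set.mem_ofList]; exact hpre
  have hsplit : PySem.Set.ofList w =
      (PySem.Set.ofList pre ++ [c]) ++
        ((PySem.Set.ofList suf).filter (fun y => !(PySem.Set.contains (PySem.Set.add (PySem.Set.ofList pre) c) y))) := by
    rw [hw, show (pre ++ c :: suf) = (pre ++ [c]) ++ suf by simp,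
      PySem.Set.ofList_append, PySem.Set.ofList_append_singleton,
      PySem.Set.update_eq_append_filter, PySem.Set.add_of_not_mem hnotmem]
  rw [hsplit, PySem.List.index?_append_of_mem _ (by simp),
    PySem.List.index?_append_singleton_self _ _ hnotmem, Option.getD_some, htake]

-- ===== VERDICT (by name: the statement is the Claim_ definition above) =====
theorem createWordPattern_v2_spec : Claim_equal_createWordPattern_v2 := by
  intro word _
  show createWordPattern_v2 word = createWordPattern_v2_alt word
  simp only [createWordPattern_v2, createWordPattern_v2_alt]
  rw [show ((0 : Int), (PySem.Dict.empty : PySem.Dict Char String), ([] : List String)) =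
        ((([] : List Char).length : Int), pvDictOf [] 0, ([] : List String)) from rfl,
    pvFold_spec, pvPat_eq]
  simp only [List.nil_append]
  refine congrArg (PySem.Str.join ".") ?_
  apply List.map_congr_left
  intro c hc
  rw [← PySem.Set.ofList_eq_foldl, pv_index_dedup_eq_card_prefix _ c hc,
      PySem.List.slice_to_natCast]
  simp [PySem.Set.len]
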